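-- pv_equiv track=rewrite | github.com/shaido-san/data_algorithm | math/primitive.py | count_primitive_triangles
-- ===== SOURCE A (Python) =====
-- import math
--
-- def count_primitive_triangles(N):
--     count = 0
--     for x1 in range(-N, N + 1):
--         for y1 in range(-N, N + 1):
--             if (x1, y1) == (0, 0): continue
--             if math.gcd(x1, y1) != 1: continue
--             for x2 in range(-N, N + 1):
--                 for y2 in range(-N, N + 1):
--                     if (x2, y2) == (0, 0) or (x2 == x1 and y2 == y1): continue
--                     if math.gcd(x2, y2) != 1: continue
--                     area = abs(x1 * y2 - x2 * y1)
--                     if area == 0: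
--                         continue  # 共線
--                     if area % 2 == 1:
--                         count += 1
--     return count // 6  # 三角形の順列の重複を除く
-- ===== SOURCE B (Python) =====
-- import math
--
-- def count_primitive_triangles(N):
--     # Classify primitive points by parity class; det(p,q) is odd iff p,q lie
--     # in different parity classes, so count cross-class ordered pairs in O(N^2).
--     c01 = 0  # x even (hence y odd)
--     c10 = 0  # x odd, y even
--     c11 = 0  # x odd, y odd
--     for x in range(-N, N + 1):
--         for y in range(-N, N + 1):
--             if math.gcd(x, y) != 1:
--                 continue
--             if x % 2 == 0:
--                 c01 += 1
--             elif y % 2 == 0: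
--                 c10 += 1
--             else:
--                 c11 += 1
--     s = c01 * c10 + c01 * c11 + c10 * c11
--     return (2 * s) // 6
-- ===== Notes on version B (the rewrite author's own statement) =====
-- stated objective: faster
-- what changed: Instead of enumerating all ordered pairs of primitive lattice points (O(N^4)), B makes one pass over the grid counting primitive points in each of the three parity classes (x even / x odd,y even / both odd); a pair has odd determinant exactly when the two points lie in different classes, so the pair count is 2*(c01*c10+c01*c11+c10*c11).
import Mathlib
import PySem

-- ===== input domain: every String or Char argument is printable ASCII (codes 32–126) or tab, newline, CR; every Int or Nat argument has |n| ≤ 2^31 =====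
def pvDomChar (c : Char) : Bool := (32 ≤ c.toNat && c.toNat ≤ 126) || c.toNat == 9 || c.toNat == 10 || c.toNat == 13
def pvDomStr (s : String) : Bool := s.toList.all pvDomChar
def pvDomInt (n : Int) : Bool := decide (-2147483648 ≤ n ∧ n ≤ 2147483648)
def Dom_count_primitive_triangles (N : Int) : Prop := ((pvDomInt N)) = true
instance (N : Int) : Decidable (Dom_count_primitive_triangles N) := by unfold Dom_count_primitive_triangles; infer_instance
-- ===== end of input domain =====

-- B replaces A's O(N^4) enumeration of ordered pairs of primitive points by one O(N^2) pass
-- counting primitive points per parity class (odd determinant ⇔ different parity classes).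

-- ===== PORT A =====
def count_primitive_triangles (N : Int) : Int :=
  let r := PySem.List.pyRange (-N) (N + 1) 1
  let count : Int :=
    r.foldl (fun c1 x1 =>
      r.foldl (fun c2 y1 =>
        if x1 = 0 ∧ y1 = 0 then c2
        else if Int.gcd x1 y1 ≠ 1 then c2
        else
          r.foldl (fun c3 x2 =>
            r.foldl (fun c4 y2 =>
              if (x2 = 0 ∧ y2 = 0) ∨ (x2 = x1 ∧ y2 = y1) then c4
              else if Int.gcd x2 y2 ≠ 1 then c4
              else
                let area := |x1 * y2 - x2 * y1|
                if area = 0 then c4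
                else if PySem.Int.mod area 2 = 1 then c4 + 1
                else c4) c3) c2) c1) 0
  PySem.Int.floordiv count 6

-- ===== PORT B =====
def count_primitive_triangles_alt (N : Int) : Int :=
  let r := PySem.List.pyRange (-N) (N + 1) 1
  let cs : Int × Int × Int :=
    r.foldl (fun s x =>
      r.foldl (fun s y =>
        if Int.gcd x y ≠ 1 then s
        else if PySem.Int.mod x 2 = 0 then (s.1 + 1, s.2.1, s.2.2)
        else if PySem.Int.mod y 2 = 0 then (s.1, s.2.1 + 1, s.2.2)
        else (s.1, s.2.1, s.2.2 + 1)) s) (0, 0, 0)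
  PySem.Int.floordiv (2 * (cs.1 * cs.2.1 + cs.1 * cs.2.2 + cs.2.1 * cs.2.2)) 6

-- ===== PRECONDITION & SPEC =====
def Spec_count_primitive_triangles (N : Int) (out : Int) : Prop := out = count_primitive_triangles_alt N
instance (N : Int) (out : Int) : Decidable (Spec_count_primitive_triangles N out) := by unfold Spec_count_primitive_triangles; infer_instance

-- ===== CLAIM (what is proved, stated in full; the proofs are below) =====
def Claim_equal_count_primitive_triangles : Prop := ∀ (N : Int), Dom_count_primitive_triangles N → Spec_count_primitive_triangles N (count_primitive_triangles N)

-- ===== LEMMAS AND PROOFS =====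

-- 0/1 indicator of a decidable proposition
def pvInd (P : Prop) [Decidable P] : Int := if P then 1 else 0

def pvSum {α : Type} (l : List α) (f : α → Int) : Int := (l.map f).sum

def pvS2 (l : List Int) (f : Int → Int → Int) : Int :=
  pvSum l (fun x => pvSum l (fun y => f x y))

-- class indicators
def pvCA (x y : Int) : Int := pvInd (Int.gcd x y = 1 ∧ x % 2 = 0)
def pvCB (x y : Int) : Int := pvInd (Int.gcd x y = 1 ∧ ¬ x % 2 = 0 ∧ y % 2 = 0)
def pvCC (x y : Int) : Int := pvInd (Int.gcd x y = 1 ∧ ¬ x % 2 = 0 ∧ ¬ y % 2 = 0)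

def pvIndDet (x1 y1 x2 y2 : Int) : Int :=
  pvInd (Int.gcd x1 y1 = 1 ∧ Int.gcd x2 y2 = 1 ∧ (x1 * y2 - x2 * y1) % 2 = 1)

lemma pvFoldl_shift {α M : Type} [AddCommMonoid M] (l : List α) (f : M → α → M) (g : α → M)
    (h : ∀ c a, f c a = c + g a) (c : M) :
    l.foldl f c = c + (l.map g).sum := by
  induction l generalizing c with
  | nil => simp
  | cons a t ih => simp [List.foldl_cons, h, ih, add_assoc]

lemma pvSum_add {α : Type} (l : List α) (f g : α → Int) :
    pvSum l (fun x => f x + g x) = pvSum l f + pvSum l g := by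
  induction l with
  | nil => simp [pvSum]
  | cons a t ih => simp [pvSum, List.map_cons] at *; omega

lemma pvSum_mul_left {α : Type} (l : List α) (a : Int) (f : α → Int) :
    pvSum l (fun x => a * f x) = a * pvSum l f := by
  induction l with
  | nil => simp [pvSum]
  | cons b t ih => simp [pvSum, List.map_cons] at *; rw [ih]; ring

lemma pvSum_mul_right {α : Type} (l : List α) (a : Int) (f : α → Int) :
    pvSum l (fun x => f x * a) = pvSum l f * a := by
  induction l with
  | nil => simp [pvSum]
  | cons b t ih => simp [pvSum, List.map_cons] at *; rw [ih]; ring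

lemma pvSum_zero {α : Type} (l : List α) : pvSum l (fun _ => (0 : Int)) = 0 := by
  simp [pvSum]

lemma pvS2_congr (l : List Int) (f g : Int → Int → Int) (h : ∀ x y, f x y = g x y) :
    pvS2 l f = pvS2 l g := by
  have : f = g := funext fun x => funext fun y => h x y
  rw [this]

lemma pvS2_mul (l : List Int) (f g : Int → Int → Int) :
    pvS2 l (fun x1 y1 => pvS2 l (fun x2 y2 => f x1 y1 * g x2 y2)) = pvS2 l f * pvS2 l g := by
  unfold pvS2
  have h1 : ∀ x1 y1, pvSum l (fun x2 => pvSum l (fun y2 => f x1 y1 * g x2 y2))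
      = f x1 y1 * pvSum l (fun x2 => pvSum l (fun y2 => g x2 y2)) := by
    intro x1 y1
    simp only [pvSum_mul_left]
  simp only [h1]
  simp only [pvSum_mul_right]

lemma pvNot_both_even {x y : Int} (h : Int.gcd x y = 1) : ¬ (x % 2 = 0 ∧ y % 2 = 0) := by
  rintro ⟨hx, hy⟩
  have dx : (2 : Int) ∣ x := Int.dvd_of_emod_eq_zero hx
  have dy : (2 : Int) ∣ y := Int.dvd_of_emod_eq_zero hy
  have hd := Int.dvd_gcd dx dy
  simp [h] at hd

lemma pvDet_parity (x1 y1 x2 y2 : Int) :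
    (x1 * y2 - x2 * y1) % 2 = ((x1 % 2) * (y2 % 2) - (x2 % 2) * (y1 % 2)) % 2 := by
  conv_lhs => rw [Int.sub_emod, Int.mul_emod, Int.mul_emod x2 y1, ← Int.sub_emod]

-- the core pointwise identity: odd determinant between primitive points ⇔ different parity class
lemma pvInd_det_eq (x1 y1 x2 y2 : Int) :
    pvIndDet x1 y1 x2 y2 =
      pvCA x1 y1 * pvCB x2 y2 + pvCA x1 y1 * pvCC x2 y2 +
      pvCB x1 y1 * pvCA x2 y2 + pvCB x1 y1 * pvCC x2 y2 +
      pvCC x1 y1 * pvCA x2 y2 + pvCC x1 y1 * pvCB x2 y2 := by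
  by_cases g1 : Int.gcd x1 y1 = 1
  · by_cases g2 : Int.gcd x2 y2 = 1
    · have h1 := pvNot_both_even g1
      have h2 := pvNot_both_even g2
      have key := pvDet_parity x1 y1 x2 y2
      rcases Int.emod_two_eq x1 with hx1 | hx1 <;> rcases Int.emod_two_eq y1 with hy1 | hy1 <;>
        rcases Int.emod_two_eq x2 with hx2 | hx2 <;> rcases Int.emod_two_eq y2 with hy2 | hy2 <;>
        first
          | (exact absurd (And.intro hx1 hy1) h1)
          | (exact absurd (And.intro hx2 hy2) h2)
          | simp [pvIndDet, pvCA, pvCB, pvCC, pvInd, g1, g2, hx1, hy1, hx2, hy2, key]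
    · simp [pvIndDet, pvCA, pvCB, pvCC, pvInd, g2]
  · simp [pvIndDet, pvCA, pvCB, pvCC, pvInd, g1]

-- ===== A-side: the quadruple fold is the double sum of pvIndDet =====
set_option maxHeartbeats 1000000 in
lemma pvA_eq (N : Int) :
    count_primitive_triangles N =
      PySem.Int.floordiv
        (pvS2 (PySem.List.pyRange (-N) (N + 1) 1)
          (fun x1 y1 => pvS2 (PySem.List.pyRange (-N) (N + 1) 1) (pvIndDet x1 y1))) 6 := by
  unfold count_primitive_triangles
  set l := PySem.List.pyRange (-N) (N + 1) 1 with hl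
  have pm : ∀ a : Int, PySem.Int.mod a 2 = a % 2 := fun a =>
    PySem.Int.mod_eq_emod_of_pos (by norm_num)
  -- inner pair of folds, for fixed x1 y1
  have hin : ∀ x1 y1 c, l.foldl (fun c3 x2 =>
      l.foldl (fun c4 y2 =>
        if (x2 = 0 ∧ y2 = 0) ∨ (x2 = x1 ∧ y2 = y1) then c4
        else if Int.gcd x2 y2 ≠ 1 then c4
        else
          let area := |x1 * y2 - x2 * y1|
          if area = 0 then c4
          else if PySem.Int.mod area 2 = 1 then c4 + 1
          else c4) c3) c
      = c + pvS2 l (fun x2 y2 =>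
          if (x2 = 0 ∧ y2 = 0) ∨ (x2 = x1 ∧ y2 = y1) then 0
          else if Int.gcd x2 y2 ≠ 1 then 0
          else if |x1 * y2 - x2 * y1| = 0 then 0
          else if PySem.Int.mod (|x1 * y2 - x2 * y1|) 2 = 1 then 1
          else 0) := by
    intro x1 y1 c
    rw [pvFoldl_shift _ _ (fun x2 => pvSum l (fun y2 =>
        if (x2 = 0 ∧ y2 = 0) ∨ (x2 = x1 ∧ y2 = y1) then 0
        else if Int.gcd x2 y2 ≠ 1 then 0
        else if |x1 * y2 - x2 * y1| = 0 then 0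
        else if PySem.Int.mod (|x1 * y2 - x2 * y1|) 2 = 1 then 1
        else 0))]
    · rfl
    · intro c3 x2
      rw [pvFoldl_shift _ _ (fun y2 =>
          if (x2 = 0 ∧ y2 = 0) ∨ (x2 = x1 ∧ y2 = y1) then 0
          else if Int.gcd x2 y2 ≠ 1 then 0
          else if |x1 * y2 - x2 * y1| = 0 then 0
          else if PySem.Int.mod (|x1 * y2 - x2 * y1|) 2 = 1 then 1
          else 0)]
      · rfl
      · intro c4 y2; dsimp only; split_ifs <;> ring
  have hout : l.foldl (fun c1 x1 =>
      l.foldl (fun c2 y1 =>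
        if x1 = 0 ∧ y1 = 0 then c2
        else if Int.gcd x1 y1 ≠ 1 then c2
        else
          l.foldl (fun c3 x2 =>
            l.foldl (fun c4 y2 =>
              if (x2 = 0 ∧ y2 = 0) ∨ (x2 = x1 ∧ y2 = y1) then c4
              else if Int.gcd x2 y2 ≠ 1 then c4
              else
                let area := |x1 * y2 - x2 * y1|
                if area = 0 then c4
                else if PySem.Int.mod area 2 = 1 then c4 + 1
                else c4) c3) c2) c1) 0
      = pvS2 l (fun x1 y1 =>
          if x1 = 0 ∧ y1 = 0 then 0
          else if Int.gcd x1 y1 ≠ 1 then 0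
          else pvS2 l (fun x2 y2 =>
            if (x2 = 0 ∧ y2 = 0) ∨ (x2 = x1 ∧ y2 = y1) then 0
            else if Int.gcd x2 y2 ≠ 1 then 0
            else if |x1 * y2 - x2 * y1| = 0 then 0
            else if PySem.Int.mod (|x1 * y2 - x2 * y1|) 2 = 1 then 1
            else 0)) := by
    rw [pvFoldl_shift _ _ (fun x1 => pvSum l (fun y1 =>
        if x1 = 0 ∧ y1 = 0 then 0
        else if Int.gcd x1 y1 ≠ 1 then 0
        else pvS2 l (fun x2 y2 =>
          if (x2 = 0 ∧ y2 = 0) ∨ (x2 = x1 ∧ y2 = y1) then 0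
          else if Int.gcd x2 y2 ≠ 1 then 0
          else if |x1 * y2 - x2 * y1| = 0 then 0
          else if PySem.Int.mod (|x1 * y2 - x2 * y1|) 2 = 1 then 1
          else 0)))]
    · rw [zero_add]; rfl
    · intro c1 x1
      rw [pvFoldl_shift _ _ (fun y1 =>
          if x1 = 0 ∧ y1 = 0 then 0
          else if Int.gcd x1 y1 ≠ 1 then 0
          else pvS2 l (fun x2 y2 =>
            if (x2 = 0 ∧ y2 = 0) ∨ (x2 = x1 ∧ y2 = y1) then 0
            else if Int.gcd x2 y2 ≠ 1 then 0
            else if |x1 * y2 - x2 * y1| = 0 then 0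
            else if PySem.Int.mod (|x1 * y2 - x2 * y1|) 2 = 1 then 1
            else 0))]
      · rfl
      · intro c2 y1; dsimp only
        split_ifs with hz hg
        · ring
        · ring
        · rw [hin x1 y1 c2]
  dsimp only
  rw [hout]
  congr 1
  apply pvS2_congr
  intro x1 y1
  by_cases g1 : Int.gcd x1 y1 = 1
  · have hz : ¬ (x1 = 0 ∧ y1 = 0) := by
      rintro ⟨h0, h1⟩; rw [h0, h1] at g1; simp [Int.gcd] at g1
    rw [if_neg hz, if_neg (by simpa using g1)]
    apply pvS2_congr
    intro x2 y2
    by_cases g2 : Int.gcd x2 y2 = 1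
    · by_cases heq : x2 = x1 ∧ y2 = y1
      · rw [if_pos (Or.inr heq)]
        have hd : x1 * y2 - x2 * y1 = 0 := by rw [heq.1, heq.2]; ring
        simp [pvIndDet, pvInd, g1, g2, hd]
      · have hz2 : ¬ (x2 = 0 ∧ y2 = 0) := by
          rintro ⟨h0, h1⟩; rw [h0, h1] at g2; simp [Int.gcd] at g2
        rw [if_neg (by tauto), if_neg (by simpa using g2)]
        rcases abs_cases (x1 * y2 - x2 * y1) with ⟨ha, _⟩ | ⟨ha, _⟩ <;>
          · rw [ha, pm]
            simp only [pvIndDet, pvInd, g1, g2, true_and]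
            split_ifs <;> omega
    · have hR : pvIndDet x1 y1 x2 y2 = 0 := by simp [pvIndDet, pvInd, g2]
      rw [hR]; split_ifs <;> rfl
  · have hz0 : pvS2 l (pvIndDet x1 y1) = 0 := by
      rw [pvS2_congr l _ (fun _ _ => 0) (fun x2 y2 => by simp [pvIndDet, pvInd, g1])]
      unfold pvS2; simp [pvSum_zero]
    rw [hz0]
    split_ifs <;> simp_all

-- ===== B-side: the class-counting fold computes the three class sums =====
lemma pvSum_triple_fst (l : List (Int × Int × Int)) : l.sum.1 = (l.map (·.1)).sum := by
  induction l with
  | nil => rfl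
  | cons a t ih => simp [List.sum_cons, ih]

lemma pvSum_triple_snd1 (l : List (Int × Int × Int)) : l.sum.2.1 = (l.map (·.2.1)).sum := by
  induction l with
  | nil => rfl
  | cons a t ih => simp [List.sum_cons, ih]

lemma pvSum_triple_snd2 (l : List (Int × Int × Int)) : l.sum.2.2 = (l.map (·.2.2)).sum := by
  induction l with
  | nil => rfl
  | cons a t ih => simp [List.sum_cons, ih]

def pvV (x y : Int) : Int × Int × Int :=
  if Int.gcd x y ≠ 1 then (0, 0, 0)
  else if x % 2 = 0 then (1, 0, 0)
  else if y % 2 = 0 then (0, 1, 0)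
  else (0, 0, 1)

set_option maxHeartbeats 1000000 in
lemma pvB_eq (N : Int) :
    count_primitive_triangles_alt N =
      PySem.Int.floordiv
        (2 * (pvS2 (PySem.List.pyRange (-N) (N + 1) 1) pvCA *
                pvS2 (PySem.List.pyRange (-N) (N + 1) 1) pvCB +
              pvS2 (PySem.List.pyRange (-N) (N + 1) 1) pvCA *
                pvS2 (PySem.List.pyRange (-N) (N + 1) 1) pvCC +
              pvS2 (PySem.List.pyRange (-N) (N + 1) 1) pvCB *
                pvS2 (PySem.List.pyRange (-N) (N + 1) 1) pvCC)) 6 := by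
  unfold count_primitive_triangles_alt
  set l := PySem.List.pyRange (-N) (N + 1) 1 with hl
  have pm : ∀ a : Int, PySem.Int.mod a 2 = a % 2 := fun a =>
    PySem.Int.mod_eq_emod_of_pos (by norm_num)
  have hfold : l.foldl (fun s x =>
      l.foldl (fun s y =>
        if Int.gcd x y ≠ 1 then s
        else if PySem.Int.mod x 2 = 0 then (s.1 + 1, s.2.1, s.2.2)
        else if PySem.Int.mod y 2 = 0 then (s.1, s.2.1 + 1, s.2.2)
        else (s.1, s.2.1, s.2.2 + 1)) s) ((0, 0, 0) : Int × Int × Int)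
      = (l.map (fun x => (l.map (pvV x)).sum)).sum := by
    rw [pvFoldl_shift _ _ (fun x => (l.map (pvV x)).sum)]
    · exact zero_add _
    · intro s x
      rw [pvFoldl_shift _ _ (pvV x)]
      intro s y
      rcases s with ⟨a, b, c⟩
      simp only [pvV, pm]
      split_ifs <;> simp
  dsimp only
  rw [hfold]
  have h1 : ((l.map (fun x => (l.map (pvV x)).sum)).sum).1 = pvS2 l pvCA := by
    rw [pvSum_triple_fst, List.map_map]
    have hc : ((fun t : Int × Int × Int => t.1) ∘ fun x => (l.map (pvV x)).sum)
        = fun x => (l.map (fun y => pvCA x y)).sum := by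
      funext x
      simp only [Function.comp]
      rw [pvSum_triple_fst, List.map_map]
      have hc2 : ((fun t : Int × Int × Int => t.1) ∘ pvV x) = fun y => pvCA x y := by
        funext y
        simp only [Function.comp]
        by_cases hg : Int.gcd x y = 1
        · by_cases hx2 : x % 2 = 0
          · simp [pvV, pvCA, pvInd, hg, hx2]
          · by_cases hy2 : y % 2 = 0 <;> simp [pvV, pvCA, pvInd, hg, hx2, hy2]
        · simp [pvV, pvCA, pvInd, hg]
      rw [hc2]
    rw [hc]
    rfl

  have h2 : ((l.map (fun x => (l.map (pvV x)).sum)).sum).2.1 = pvS2 l pvCB := by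
    rw [pvSum_triple_snd1, List.map_map]
    have hc : ((fun t : Int × Int × Int => t.2.1) ∘ fun x => (l.map (pvV x)).sum)
        = fun x => (l.map (fun y => pvCB x y)).sum := by
      funext x
      simp only [Function.comp]
      rw [pvSum_triple_snd1, List.map_map]
      have hc2 : ((fun t : Int × Int × Int => t.2.1) ∘ pvV x) = fun y => pvCB x y := by
        funext y
        simp only [Function.comp]
        by_cases hg : Int.gcd x y = 1
        · by_cases hx2 : x % 2 = 0
          · simp [pvV, pvCB, pvInd, hg, hx2]
          · by_cases hy2 : y % 2 = 0 <;> simp [pvV, pvCB, pvInd, hg, hx2, hy2]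
        · simp [pvV, pvCB, pvInd, hg]
      rw [hc2]
    rw [hc]
    rfl

  have h3 : ((l.map (fun x => (l.map (pvV x)).sum)).sum).2.2 = pvS2 l pvCC := by
    rw [pvSum_triple_snd2, List.map_map]
    have hc : ((fun t : Int × Int × Int => t.2.2) ∘ fun x => (l.map (pvV x)).sum)
        = fun x => (l.map (fun y => pvCC x y)).sum := by
      funext x
      simp only [Function.comp]
      rw [pvSum_triple_snd2, List.map_map]
      have hc2 : ((fun t : Int × Int × Int => t.2.2) ∘ pvV x) = fun y => pvCC x y := by
        funext y
        simp only [Function.comp]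
        by_cases hg : Int.gcd x y = 1
        · by_cases hx2 : x % 2 = 0
          · simp [pvV, pvCC, pvInd, hg, hx2]
          · by_cases hy2 : y % 2 = 0 <;> simp [pvV, pvCC, pvInd, hg, hx2, hy2]
        · simp [pvV, pvCC, pvInd, hg]
      rw [hc2]
    rw [hc]
    rfl

  rw [h1, h2, h3]

-- ===== the combinatorial identity =====
lemma pvCore (l : List Int) :
    pvS2 l (fun x1 y1 => pvS2 l (pvIndDet x1 y1)) =
      2 * (pvS2 l pvCA * pvS2 l pvCB + pvS2 l pvCA * pvS2 l pvCC +
           pvS2 l pvCB * pvS2 l pvCC) := by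
  have hpt : (fun x1 y1 => pvS2 l (pvIndDet x1 y1)) =
      (fun x1 y1 => pvS2 l (fun x2 y2 =>
        pvCA x1 y1 * pvCB x2 y2 + pvCA x1 y1 * pvCC x2 y2 +
        pvCB x1 y1 * pvCA x2 y2 + pvCB x1 y1 * pvCC x2 y2 +
        pvCC x1 y1 * pvCA x2 y2 + pvCC x1 y1 * pvCB x2 y2)) := by
    funext x1 y1
    congr 1
    funext x2 y2
    exact pvInd_det_eq x1 y1 x2 y2
  rw [hpt]
  have hsplit : ∀ x1 y1, pvS2 l (fun x2 y2 =>
        pvCA x1 y1 * pvCB x2 y2 + pvCA x1 y1 * pvCC x2 y2 +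
        pvCB x1 y1 * pvCA x2 y2 + pvCB x1 y1 * pvCC x2 y2 +
        pvCC x1 y1 * pvCA x2 y2 + pvCC x1 y1 * pvCB x2 y2)
      = pvS2 l (fun x2 y2 => pvCA x1 y1 * pvCB x2 y2)
        + pvS2 l (fun x2 y2 => pvCA x1 y1 * pvCC x2 y2)
        + pvS2 l (fun x2 y2 => pvCB x1 y1 * pvCA x2 y2)
        + pvS2 l (fun x2 y2 => pvCB x1 y1 * pvCC x2 y2)
        + pvS2 l (fun x2 y2 => pvCC x1 y1 * pvCA x2 y2)
        + pvS2 l (fun x2 y2 => pvCC x1 y1 * pvCB x2 y2) := by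
    intro x1 y1
    unfold pvS2
    simp only [pvSum_add]
  have hsplit2 : pvS2 l (fun x1 y1 =>
        pvS2 l (fun x2 y2 => pvCA x1 y1 * pvCB x2 y2)
        + pvS2 l (fun x2 y2 => pvCA x1 y1 * pvCC x2 y2)
        + pvS2 l (fun x2 y2 => pvCB x1 y1 * pvCA x2 y2)
        + pvS2 l (fun x2 y2 => pvCB x1 y1 * pvCC x2 y2)
        + pvS2 l (fun x2 y2 => pvCC x1 y1 * pvCA x2 y2)
        + pvS2 l (fun x2 y2 => pvCC x1 y1 * pvCB x2 y2))
      = pvS2 l (fun x1 y1 => pvS2 l (fun x2 y2 => pvCA x1 y1 * pvCB x2 y2))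
        + pvS2 l (fun x1 y1 => pvS2 l (fun x2 y2 => pvCA x1 y1 * pvCC x2 y2))
        + pvS2 l (fun x1 y1 => pvS2 l (fun x2 y2 => pvCB x1 y1 * pvCA x2 y2))
        + pvS2 l (fun x1 y1 => pvS2 l (fun x2 y2 => pvCB x1 y1 * pvCC x2 y2))
        + pvS2 l (fun x1 y1 => pvS2 l (fun x2 y2 => pvCC x1 y1 * pvCA x2 y2))
        + pvS2 l (fun x1 y1 => pvS2 l (fun x2 y2 => pvCC x1 y1 * pvCB x2 y2)) := by
    unfold pvS2
    simp only [pvSum_add]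
  have heq : (fun x1 y1 => pvS2 l (fun x2 y2 =>
        pvCA x1 y1 * pvCB x2 y2 + pvCA x1 y1 * pvCC x2 y2 +
        pvCB x1 y1 * pvCA x2 y2 + pvCB x1 y1 * pvCC x2 y2 +
        pvCC x1 y1 * pvCA x2 y2 + pvCC x1 y1 * pvCB x2 y2))
      = (fun x1 y1 =>
        pvS2 l (fun x2 y2 => pvCA x1 y1 * pvCB x2 y2)
        + pvS2 l (fun x2 y2 => pvCA x1 y1 * pvCC x2 y2)
        + pvS2 l (fun x2 y2 => pvCB x1 y1 * pvCA x2 y2)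
        + pvS2 l (fun x2 y2 => pvCB x1 y1 * pvCC x2 y2)
        + pvS2 l (fun x2 y2 => pvCC x1 y1 * pvCA x2 y2)
        + pvS2 l (fun x2 y2 => pvCC x1 y1 * pvCB x2 y2)) := by
    funext x1 y1; exact hsplit x1 y1
  rw [heq, hsplit2]
  rw [pvS2_mul l pvCA pvCB, pvS2_mul l pvCA pvCC, pvS2_mul l pvCB pvCA,
      pvS2_mul l pvCB pvCC, pvS2_mul l pvCC pvCA, pvS2_mul l pvCC pvCB]
  ring

-- ===== VERDICT (by name: the statement is the Claim_ definition above) =====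
theorem count_primitive_triangles_spec : Claim_equal_count_primitive_triangles := by
  intro N _
  unfold Spec_count_primitive_triangles
  rw [pvA_eq, pvB_eq, pvCore]
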